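-- pv_equiv track=rewrite | github.com/krishras23/DataStructures-Review | Strings.py | even_lenhgth_words
-- ===== SOURCE A (Python) =====
-- def even_lenhgth_words(given_string):
--     even_list = []
--     beg = 0
--
--     while True:
--         end = given_string.find(" ", beg)
--         if end == - 1:
--             break
--         word = given_string[beg:end]
--         if len(word) % 2 == 0:
--             even_list.append(word)
--         beg = end + 1
--
--     return even_list
-- ===== SOURCE B (Python) =====
-- def even_lenhgth_words(given_string):
--     even_list = []
--     current = ""
--     for ch in given_string:
--         if ch == " ":
--             if len(current) % 2 == 0:
--                 even_list.append(current)
--             current = ""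
--         else:
--             current += ch
--     return even_list
-- ===== Notes on version B (the rewrite author's own statement) =====
-- stated objective: simpler
-- what changed: replaces A's repeated find()-and-slice index loop with a single character-by-character pass that accumulates the current word and emits it on each space (the trailing word after the last space is never emitted, matching A).
import Mathlib
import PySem

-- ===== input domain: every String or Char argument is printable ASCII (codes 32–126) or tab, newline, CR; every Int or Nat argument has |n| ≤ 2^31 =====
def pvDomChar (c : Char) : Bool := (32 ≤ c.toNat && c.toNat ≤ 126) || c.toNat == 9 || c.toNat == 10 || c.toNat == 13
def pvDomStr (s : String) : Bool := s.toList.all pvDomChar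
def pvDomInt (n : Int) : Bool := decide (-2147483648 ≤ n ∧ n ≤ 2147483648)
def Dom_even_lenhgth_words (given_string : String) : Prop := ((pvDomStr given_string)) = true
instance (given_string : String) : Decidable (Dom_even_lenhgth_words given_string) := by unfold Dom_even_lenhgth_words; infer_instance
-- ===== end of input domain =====

-- ===== PORT A =====
-- A: repeated s.find(" ", beg) with slicing; fuel = length+1 bounds the loop (beg strictly increases).
def evenLoopA (s : String) : Nat → Nat → List String → List String
  | 0, _, acc => acc
  | fuel+1, beg, acc =>
    let e := PySem.Str.findFrom s " " (beg : Int) none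
    if e = -1 then acc
    else
      let word := PySem.Str.slice s (some (beg : Int)) (some e)
      let acc' := if PySem.Int.mod (PySem.Str.len word) 2 == 0 then acc ++ [word] else acc
      evenLoopA s fuel (e + 1).toNat acc'

def even_lenhgth_words (given_string : String) : List String :=
  evenLoopA given_string (given_string.toList.length + 1) 0 []

-- ===== PORT B =====
-- B: one pass over the characters, accumulating the current word, emitting it at each space.
def even_lenhgth_words_alt (given_string : String) : List String :=
  (given_string.toList.foldl
    (fun (st : List String × List Char) ch =>
      if ch = ' ' then
        ((if st.2.length % 2 = 0 then st.1 ++ [String.ofList st.2] else st.1), ([] : List Char))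
      else (st.1, st.2 ++ [ch]))
    ([], [])).1

-- ===== PRECONDITION & SPEC =====
def Spec_even_lenhgth_words (given_string : String) (out : List String) : Prop := out = even_lenhgth_words_alt given_string
instance (given_string : String) (out : List String) : Decidable (Spec_even_lenhgth_words given_string out) := by unfold Spec_even_lenhgth_words; infer_instance

-- ===== CLAIM (what is proved, stated in full; the proofs are below) =====
def Claim_equal_even_lenhgth_words : Prop := ∀ (given_string : String), Dom_even_lenhgth_words given_string → Spec_even_lenhgth_words given_string (even_lenhgth_words given_string)

-- ===== LEMMAS AND PROOFS =====

-- reference function: B's state machine with explicit current word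
def pvR : List Char → List Char → List String
  | _, [] => []
  | cur, c :: t =>
    if c = ' ' then (if cur.length % 2 = 0 then [String.ofList cur] else []) ++ pvR [] t
    else pvR (cur ++ [c]) t

lemma pvR_no_space (t : List Char) (cur : List Char) (h : ' ' ∉ t) : pvR cur t = [] := by
  induction t generalizing cur with
  | nil => rfl
  | cons c t ih =>
    simp only [pvR]
    rw [if_neg (by intro hc; exact h (by simp [hc]))]
    exact ih _ (by intro hm; exact h (by simp [hm]))

lemma pvR_split (a b : List Char) (cur : List Char) (h : ' ' ∉ a) :
    pvR cur (a ++ ' ' :: b) =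
      (if (cur ++ a).length % 2 = 0 then [String.ofList (cur ++ a)] else []) ++ pvR [] b := by
  induction a generalizing cur with
  | nil => simp [pvR]
  | cons c a ih =>
    have hc : c ≠ ' ' := by intro hc; exact h (by simp [hc])
    simp only [List.cons_append, pvR, if_neg hc]
    rw [ih _ (by intro hm; exact h (by simp [hm]))]
    simp

lemma foldl_eq_pvR (t : List Char) (res : List String) (cur : List Char) :
    (t.foldl
      (fun (st : List String × List Char) ch =>
        if ch = ' ' then
          ((if st.2.length % 2 = 0 then st.1 ++ [String.ofList st.2] else st.1), ([] : List Char))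
        else (st.1, st.2 ++ [ch]))
      (res, cur)).1 = res ++ pvR cur t := by
  induction t generalizing res cur with
  | nil => simp [pvR]
  | cons c t ih =>
    simp only [List.foldl_cons, pvR]
    by_cases hc : c = ' '
    · rw [if_pos hc, if_pos hc, ih]
      by_cases he : cur.length % 2 = 0 <;> simp [he]
    · rw [if_neg hc, if_neg hc, ih]

lemma singleton_prefix_iff (a : Char) (l : List Char) : [a] <+: l ↔ l.head? = some a := by
  cases l with
  | nil => simp
  | cons b t => simp [List.cons_prefix_cons, eq_comm]

lemma loopA_eq (s : String) : ∀ (fuel beg : Nat) (acc : List String),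
    beg ≤ s.toList.length → s.toList.length - beg < fuel →
    evenLoopA s fuel beg acc = acc ++ pvR [] (s.toList.drop beg) := by
  intro fuel
  induction fuel with
  | zero => intro beg acc h1 h2; omega
  | succ fuel ih =>
    intro beg acc hbeg hfu
    set t := s.toList.drop beg with ht
    have htlen : t.length = s.toList.length - beg := by rw [ht]; simp
    have hE : PySem.Str.findFrom s " " (beg : Int) none =
        if PySem.Chars.find t [' '] = -1 then -1 else (beg : Int) + PySem.Chars.find t [' '] := by
      rw [PySem.Str.findFrom_eq, show (" " : String).toList = [' '] from rfl,
        PySem.Chars.findFrom_natCast s.toList [' '] beg hbeg]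
    by_cases hfind : PySem.Chars.find t [' '] = -1
    · -- no space from beg on: the loop breaks, pvR produces []
      have hns : ' ' ∉ t := by
        intro hm
        obtain ⟨l1, l2, hl⟩ := List.append_of_mem hm
        exact ((PySem.Chars.find_eq_neg_one_iff t [' ']).mp hfind) ⟨l1, l2, by simp [hl]⟩
      simp only [evenLoopA, hE, if_pos hfind]
      rw [pvR_no_space _ _ hns]; simp
    · -- first space at index j of t
      have hpos : 0 ≤ PySem.Chars.find t [' '] := by
        have := PySem.Chars.neg_one_le_find t [' ']
        omega
      set j := (PySem.Chars.find t [' ']).toNat with hj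
      have hjf : PySem.Chars.find t [' '] = (j : Int) := (Int.toNat_of_nonneg hpos).symm
      obtain ⟨hpre, hmin⟩ := PySem.Chars.find_spec (s := t) (sub := [' ']) hpos
      have hgj : t[j]? = some ' ' := by
        rw [← List.head?_drop]; exact (singleton_prefix_iff _ _).mp hpre
      have hjlt : j < t.length := by
        by_contra hge
        rw [List.getElem?_eq_none (by omega)] at hgj; cases hgj
      have hnota : ' ' ∉ t.take j := by
        intro hm
        obtain ⟨i, hi, hgi⟩ := List.getElem_of_mem hm
        have hij : i < j := by simp [List.length_take] at hi; omega
        have hmi := hmin i hij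
        rw [singleton_prefix_iff, List.head?_drop] at hmi
        apply hmi
        rw [List.getElem?_eq_getElem (by omega : i < t.length)]
        simp only [List.getElem_take] at hgi
        simp [hgi]
      have hEe : PySem.Str.findFrom s " " (beg : Int) none = (beg : Int) + (j : Int) := by
        rw [hE, if_neg hfind, hjf]
      have hEne : ((beg : Int) + (j : Int)) ≠ -1 := by omega
      -- the sliced word is t.take j
      have hword : PySem.Str.slice s (some (beg : Int)) (some ((beg : Int) + (j : Int))) =
          String.ofList (t.take j) := by
        show String.ofList (PySem.Chars.slice s.toList (some (beg : Int)) (some ((beg : Int) + (j : Int)))) = _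
        rw [PySem.Chars.slice_eq_listSlice, PySem.List.slice_natCast_add]
      have hlen : (String.ofList (t.take j)).toList.length = j := by
        simp [List.length_take]; omega
      -- decompose t around the first space
      have hdec : t = t.take j ++ ' ' :: t.drop (j+1) := by
        conv_lhs => rw [← List.take_append_drop j t]
        congr 1
        rw [List.drop_eq_getElem_cons hjlt]
        congr 1
        have := List.getElem?_eq_getElem (l := t) (i := j) hjlt
        rw [this] at hgj; exact Option.some.inj hgj
      have hlt : (t.take j).length = j := by simp [List.length_take]; omega
      have hmod : (PySem.Int.mod (PySem.Str.len (String.ofList (t.take j))) 2 == 0) =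
          decide (j % 2 = 0) := by
        have hl : PySem.Str.len (String.ofList (t.take j)) = ((t.take j).length : Int) := by
          simp [PySem.Str.len]
        rw [hl, hlt]
        have h2 : PySem.Int.mod (j : Int) 2 = ((j : Int) % 2) := by
          simp [PySem.Int.mod, Int.fmod_eq_emod]
        rw [h2]
        by_cases hp : j % 2 = 0 <;> simp [hp] <;> omega
      simp only [evenLoopA, hEe, if_neg hEne, hword, hmod]
      have htn : ((beg : Int) + (j : Int) + 1).toNat = beg + j + 1 := by omega
      rw [htn, ih (beg + j + 1) _ (by omega) (by omega)]
      have hdrop : s.toList.drop (beg + j + 1) = t.drop (j+1) := by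
        rw [ht, List.drop_drop]; ring_nf
      rw [hdrop]
      conv_rhs => rw [hdec, pvR_split _ _ _ hnota]
      by_cases hp : j % 2 = 0
      · rw [if_pos (by simp [hp]), if_pos (by simp [hlt, hp])]
        simp
      · rw [if_neg (by simp [hp]), if_neg (by simp [hlt, hp])]
        simp

-- ===== VERDICT (by name: the statement is the Claim_ definition above) =====
theorem even_lenhgth_words_spec : Claim_equal_even_lenhgth_words := by
  intro s _
  unfold Spec_even_lenhgth_words even_lenhgth_words even_lenhgth_words_alt
  rw [loopA_eq s (s.toList.length + 1) 0 [] (by omega) (by omega)]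
  rw [foldl_eq_pvR]
  simp
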